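-- pv_equiv track=rewrite | github.com/kleur/adventofcode | 2020/2/day2.py | is_valid_pt2
-- ===== SOURCE A (Python) =====
-- def is_valid_pt2(pos, glyph, password, n):
--     if n > len(password) or (len(pos) > 0 and n > pos[-1]):
--         return len(pos) == 1
--
--     cur = password[n - 1]
--
--     if glyph == cur:
--         if n in pos:
--             pos.remove(n)
--
--     return is_valid_pt2(pos, glyph, password, n + 1)
-- ===== SOURCE B (Python) =====
-- def is_valid_pt2(pos, glyph, password, n):
--     hits = sum(1 for v in pos if n <= v <= len(password) and glyph == password[v - 1])
--     return len(pos) - hits == 1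
-- ===== Notes on version B (the rewrite author's own statement) =====
-- stated objective: simpler
-- what changed: B replaces A's recursive character-by-character scan of the password with in-place removals from pos by a single counting pass over pos (count positions in range that hold the glyph, compare with len(pos)-1); Pre_ excludes inputs where A raises IndexError (start index at or below -len(password) with nothing to stop the scan) and - unless n is already past the password, where A stops at once - pos lists that are not strictly increasing, on which A's early stop against the mutating pos[-1] and first-occurrence removal give order-dependent accidental values; …
-- outside the precondition, e.g. on is_valid_pt2([2, 2], 'a', 'baa', 1): A returns True, B returns False; on is_valid_pt2([5, 1], 'a', 'aaaaa', 2): A returns False, B returns True; on is_valid_pt2([], 'a', 'ab', -2): A raises IndexError, B returns False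
import Mathlib
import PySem

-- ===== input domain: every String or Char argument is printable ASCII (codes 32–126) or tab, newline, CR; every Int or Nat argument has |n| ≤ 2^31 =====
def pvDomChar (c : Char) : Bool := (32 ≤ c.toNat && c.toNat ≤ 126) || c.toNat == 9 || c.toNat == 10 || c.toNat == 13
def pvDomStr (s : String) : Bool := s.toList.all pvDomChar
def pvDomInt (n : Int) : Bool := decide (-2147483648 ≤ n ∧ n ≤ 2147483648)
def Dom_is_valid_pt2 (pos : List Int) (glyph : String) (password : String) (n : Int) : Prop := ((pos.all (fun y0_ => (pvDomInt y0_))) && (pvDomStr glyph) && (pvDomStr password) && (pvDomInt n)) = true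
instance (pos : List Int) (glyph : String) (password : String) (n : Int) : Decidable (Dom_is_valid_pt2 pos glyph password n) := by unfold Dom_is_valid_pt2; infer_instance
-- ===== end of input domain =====

-- B replaces A's recursive scan over password positions (with in-place removals from pos) by one
-- counting pass over pos. A mutates its `pos` argument in place (pos.remove); the equivalence
-- proved here is about the RETURN value only — B does not mutate.

-- ===== PORT A =====
-- `glyph == password[i]` where the right side is a 1-character string: equal iff glyph's code points are exactly [c]
def pvMatch (glyph password : String) (v : Int) : Bool :=
  match PySem.Str.pyGet? password (v - 1) with
  | some c => glyph.toList == [c]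
  | none => false

def is_valid_pt2 (pos : List Int) (glyph : String) (password : String) (n : Int) : Bool :=
  if decide (n > PySem.Str.len password) ||
     (decide (0 < PySem.List.len pos) &&
      (match PySem.List.pyGet? pos (-1) with
       | some last => decide (n > last)
       | none => false)) then
    decide (PySem.List.len pos = 1)
  else
    match PySem.Str.pyGet? password (n - 1) with
    | none => false   -- Python raises IndexError here; excluded by Pre_is_valid_pt2
    | some c =>
      let pos' := if glyph.toList == [c] then
                    (if n ∈ pos then (PySem.List.remove? pos n).getD pos else pos)
                  else pos
      is_valid_pt2 pos' glyph password (n + 1)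
termination_by (PySem.Str.len password + 1 - n).toNat
decreasing_by
  simp only [Bool.or_eq_true, decide_eq_true_eq, not_or] at *
  omega

-- ===== PORT B =====
def is_valid_pt2_alt (pos : List Int) (glyph : String) (password : String) (n : Int) : Bool :=
  let hits := (pos.filter (fun v =>
      decide (n ≤ v) && decide (v ≤ PySem.Str.len password) && pvMatch glyph password v)).length
  decide (PySem.List.len pos - (hits : Int) = 1)

-- ===== PRECONDITION & SPEC =====
-- Pre_ excludes inputs where A raises IndexError (start index at or below -len(password) with no
-- element of pos below n to stop the scan) and — unless n is already past the password, where A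
-- stops at once — pos lists that are not strictly increasing, on which A's early stop against the
-- mutating pos[-1] and first-occurrence removal give order-dependent accidental values; positions
-- are a sorted duplicate-free list in the puzzle's domain.
def Pre_is_valid_pt2 (pos : List Int) (glyph : String) (password : String) (n : Int) : Prop :=
  PySem.Str.len password < n ∨
    (pos.Pairwise (· < ·) ∧
      (-(PySem.Str.len password) < n ∨ pos.getLast?.getD n < n))
instance (pos : List Int) (glyph : String) (password : String) (n : Int) : Decidable (Pre_is_valid_pt2 pos glyph password n) := by unfold Pre_is_valid_pt2; infer_instance

def pvWitness_is_valid_pt2 : List Int × String × String × Int := ([1, 3], "a", "abaca", 1)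

def Spec_is_valid_pt2 (pos : List Int) (glyph : String) (password : String) (n : Int) (out : Bool) : Prop := out = is_valid_pt2_alt pos glyph password n
instance (pos : List Int) (glyph : String) (password : String) (n : Int) (out : Bool) : Decidable (Spec_is_valid_pt2 pos glyph password n out) := by unfold Spec_is_valid_pt2; infer_instance

-- ===== CLAIM (what is proved, stated in full; the proofs are below) =====
def Claim_equal_is_valid_pt2 : Prop := ∀ (pos : List Int) (glyph : String) (password : String) (n : Int), Dom_is_valid_pt2 pos glyph password n → Pre_is_valid_pt2 pos glyph password n → Spec_is_valid_pt2 pos glyph password n (is_valid_pt2 pos glyph password n)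

-- ===== LEMMAS AND PROOFS =====

-- in a strictly increasing list every element is at most the last one
theorem pv_mem_le_getLast : ∀ (l : List Int), l.Pairwise (· < ·) → ∀ v ∈ l, ∀ last, l.getLast? = some last → v ≤ last := by
  intro l
  induction l with
  | nil => intro _ v hv; exact absurd hv (List.not_mem_nil)
  | cons x xs ih =>
    intro h v hv last hl
    cases xs with
    | nil =>
      have hvx : v = x := by simpa using hv
      have hlx : last = x := by simp [List.getLast?_singleton] at hl; omega
      omega
    | cons y ys =>
      rw [List.getLast?_cons_cons] at hl
      rcases List.mem_cons.mp hv with rfl | hmem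
      · have hlm : last ∈ y :: ys := by
          obtain ⟨l', hl2⟩ := List.getLast?_eq_some_iff.mp hl
          rw [hl2]; exact List.mem_append.mpr (Or.inr (List.mem_singleton_self _))
        have := (List.pairwise_cons.mp h).1 last hlm
        omega
      · exact ih (List.pairwise_cons.mp h).2 v hmem last hl

-- once n is past the password, B counts nothing
theorem pv_alt_gtE (pos : List Int) (g P : String) (n : Int)
    (h : PySem.Str.len P < n) :
    is_valid_pt2_alt pos g P n = decide (PySem.List.len pos = 1) := by
  have hfil : pos.filter (fun v =>
      decide (n ≤ v) && decide (v ≤ PySem.Str.len P) && pvMatch g P v) = [] := by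
    refine List.filter_eq_nil_iff.mpr (fun v hv => ?_)
    simp only [Bool.and_eq_true, decide_eq_true_eq, not_and]
    intro h1 h2; omega
  simp only [is_valid_pt2_alt, hfil]
  simp

-- when A's stop test fires, B counts nothing from n on
theorem pv_alt_base (pos : List Int) (g P : String) (n : Int) (hpw : pos.Pairwise (· < ·))
    (hcond : (decide (n > PySem.Str.len P) ||
            decide (0 < PySem.List.len pos) &&
              match PySem.List.pyGet? pos (-1) with
              | some last => decide (n > last)
              | none => false) = true) :
    is_valid_pt2_alt pos g P n = decide (PySem.List.len pos = 1) := by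
  have hfil : pos.filter (fun v =>
      decide (n ≤ v) && decide (v ≤ PySem.Str.len P) && pvMatch g P v) = [] := by
    refine List.filter_eq_nil_iff.mpr (fun v hv => ?_)
    rw [Bool.or_eq_true, Bool.and_eq_true] at hcond
    simp only [Bool.and_eq_true, decide_eq_true_eq, not_and]
    intro h1 h2
    rcases hcond with h | ⟨_, h⟩
    · have := of_decide_eq_true h; omega
    · cases hget : PySem.List.pyGet? pos (-1) with
      | none => rw [hget] at h; simp at h
      | some last =>
        rw [hget] at h
        have hlt : last < n := by simpa using h
        have hlast : pos.getLast? = some last := by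
          rw [PySem.List.pyGet?_neg_one] at hget; exact hget
        have := pv_mem_le_getLast pos hpw v hv last hlast
        exfalso; omega
  simp only [is_valid_pt2_alt, hfil]
  simp

-- counting with the removed position: one hit at n plus the rest, shifted to n+1
theorem pv_filter_erase (g P : String) (n E : Int) :
    ∀ l : List Int, l.Nodup → n ∈ l → (n ≤ E) → pvMatch g P n = true →
      (l.filter (fun v => decide (n ≤ v) && decide (v ≤ E) && pvMatch g P v)).length
        = ((l.erase n).filter (fun v => decide (n + 1 ≤ v) && decide (v ≤ E) && pvMatch g P v)).length + 1 := by
  intro l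
  induction l with
  | nil => intro _ h; exact absurd h (List.not_mem_nil)
  | cons x xs ih =>
    intro hnd hmem hnE hmt
    have hnd' := (List.nodup_cons.mp hnd).2
    by_cases hx : x = n
    · subst hx
      have hxs : x ∉ xs := (List.nodup_cons.mp hnd).1
      rw [List.erase_cons_head, List.filter_cons,
          if_pos (by
            simp only [Bool.and_eq_true, decide_eq_true_eq]
            exact ⟨⟨le_refl x, hnE⟩, hmt⟩),
          List.length_cons]
      congr 1
      apply congrArg List.length
      refine List.filter_congr (fun v hv => ?_)
      have hvne : v ≠ x := fun h => hxs (h ▸ hv)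
      have hdd : decide (x ≤ v) = decide (x + 1 ≤ v) := by
        simp only [decide_eq_decide]; omega
      rw [hdd]
    · have hmem' : n ∈ xs := by
        rcases List.mem_cons.mp hmem with h | h
        · exact absurd h.symm hx
        · exact h
      rw [List.erase_cons_tail (by simpa using (fun h => hx h))]
      have hsame : (decide (n ≤ x) && decide (x ≤ E) && pvMatch g P x)
          = (decide (n + 1 ≤ x) && decide (x ≤ E) && pvMatch g P x) := by
        have hdd : decide (n ≤ x) = decide (n + 1 ≤ x) := by
          simp only [decide_eq_decide]; omega
        rw [hdd]
      rw [List.filter_cons, List.filter_cons, ← hsame]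
      by_cases hk : (decide (n ≤ x) && decide (x ≤ E) && pvMatch g P x) = true
      · rw [if_pos hk, if_pos hk, List.length_cons, List.length_cons,
            ih hnd' hmem' hnE hmt]
      · rw [if_neg hk, if_neg hk]
        exact ih hnd' hmem' hnE hmt

-- the step A takes preserves B's value
theorem pv_alt_step (g P : String) (pos : List Int) (n : Int) (c : Char)
    (hpw : pos.Pairwise (· < ·)) (hnE : n ≤ PySem.Str.len P)
    (hsome : PySem.Str.pyGet? P (n - 1) = some c) :
    is_valid_pt2_alt pos g P n =
      is_valid_pt2_alt
        (if (g.toList == [c]) = true then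
            (if n ∈ pos then (PySem.List.remove? pos n).getD pos else pos)
          else pos) g P (n + 1) := by
  have hmatch : pvMatch g P n = (g.toList == [c]) := by
    simp only [pvMatch, hsome]
  set E := PySem.Str.len P with hE
  by_cases hb : (g.toList == [c]) = true ∧ n ∈ pos
  · obtain ⟨hg, hmem⟩ := hb
    have hmt : pvMatch g P n = true := by rw [hmatch, hg]
    have hpos' : (if (g.toList == [c]) = true then
        (if n ∈ pos then (PySem.List.remove? pos n).getD pos else pos) else pos) = pos.erase n := by
      rw [if_pos hg, if_pos hmem, PySem.List.remove?_eq_some_erase pos n hmem, Option.getD_some]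
    rw [hpos']
    have hnd : pos.Nodup := hpw.imp (fun h => ne_of_lt h)
    have hcnt := pv_filter_erase g P n E pos hnd hmem hnE hmt
    have hlen : pos.length = (pos.erase n).length + 1 := by
      have h1 := List.length_erase_of_mem hmem
      have hp : 0 < pos.length := List.length_pos_of_mem hmem
      omega
    simp only [is_valid_pt2_alt, ← hE, hcnt]
    rw [decide_eq_decide, PySem.List.len_eq, PySem.List.len_eq, hlen]
    push_cast
    constructor <;> (intro h; omega)
  · have hpos' : (if (g.toList == [c]) = true then
        (if n ∈ pos then (PySem.List.remove? pos n).getD pos else pos) else pos) = pos := by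
      by_cases hg : (g.toList == [c]) = true
      · rw [if_pos hg, if_neg (fun hm => hb ⟨hg, hm⟩)]
      · rw [if_neg hg]
    rw [hpos']
    have hfil : pos.filter (fun v => decide (n ≤ v) && decide (v ≤ E) && pvMatch g P v)
        = pos.filter (fun v => decide (n + 1 ≤ v) && decide (v ≤ E) && pvMatch g P v) := by
      refine List.filter_congr (fun v hv => ?_)
      by_cases hvn : v = n
      · subst hvn
        by_cases hg : (g.toList == [c]) = true
        · exact absurd ⟨hg, hv⟩ hb
        · have : pvMatch g P v = false := by
            rw [hmatch]; exact Bool.eq_false_iff.mpr hg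
          simp [this]
      · have : decide (n ≤ v) = decide (n + 1 ≤ v) := by
          simp only [decide_eq_decide]; omega
        rw [this]
    simp only [is_valid_pt2_alt, ← hE, hfil]

-- the main induction, following A's recursion
theorem pv_main (g P : String) : ∀ (pos : List Int) (n : Int),
    Pre_is_valid_pt2 pos g P n →
    is_valid_pt2 pos g P n = is_valid_pt2_alt pos g P n := by
  have H : ∀ (k : Nat) (pos : List Int) (n : Int),
      (PySem.Str.len P + 1 - n).toNat ≤ k →
      Pre_is_valid_pt2 pos g P n →
      is_valid_pt2 pos g P n = is_valid_pt2_alt pos g P n := by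
    intro k
    induction k with
    | zero =>
      intro pos n hk hpre
      have hgt : n > PySem.Str.len P := by omega
      have hcond : (decide (n > PySem.Str.len P) ||
          decide (0 < PySem.List.len pos) &&
            match PySem.List.pyGet? pos (-1) with
            | some last => decide (n > last)
            | none => false) = true := by
        rw [Bool.or_eq_true]; exact Or.inl (decide_eq_true hgt)
      rw [is_valid_pt2, if_pos hcond, pv_alt_gtE pos g P n hgt]
    | succ k ihk =>
      intro pos n hk hpre
      rcases hpre with hgt | ⟨hpw, hdisj⟩
      · have hcond : (decide (n > PySem.Str.len P) ||
            decide (0 < PySem.List.len pos) &&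
              match PySem.List.pyGet? pos (-1) with
              | some last => decide (n > last)
              | none => false) = true := by
          rw [Bool.or_eq_true]; exact Or.inl (decide_eq_true hgt)
        rw [is_valid_pt2, if_pos hcond, pv_alt_gtE pos g P n hgt]
      rw [is_valid_pt2]
      by_cases hcond : (decide (n > PySem.Str.len P) ||
          decide (0 < PySem.List.len pos) &&
            match PySem.List.pyGet? pos (-1) with
            | some last => decide (n > last)
            | none => false) = true
      · rw [if_pos hcond, pv_alt_base pos g P n hpw hcond]
      · rw [if_neg hcond]
        rw [Bool.or_eq_true, not_or, Bool.and_eq_true] at hcond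
        obtain ⟨h1, h2⟩ := hcond
        have hnE : n ≤ PySem.Str.len P := by simpa using h1
        have hlow : -(PySem.Str.len P) < n := by
          rcases hdisj with h | h
          · exact h
          · cases hlast : pos.getLast? with
            | none => rw [hlast] at h; simp at h
            | some last =>
              rw [hlast] at h
              simp only [Option.getD_some] at h
              exfalso
              apply h2
              have hpos : pos ≠ [] := by
                intro hn; rw [hn] at hlast; simp at hlast
              refine ⟨decide_eq_true ?_, ?_⟩
              · rw [PySem.List.len_eq]
                exact_mod_cast List.length_pos_of_ne_nil hpos
              · rw [PySem.List.pyGet?_neg_one, hlast]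
                exact decide_eq_true (by omega)
        cases hget : PySem.Str.pyGet? P (n - 1) with
        | none =>
          exfalso
          rw [PySem.Str.pyGet?_eq, PySem.Chars.pyGet?_eq_listPyGet?,
              PySem.List.pyGet?_eq_none_iff] at hget
          apply hget
          unfold PySem.Raise.InRange
          rw [PySem.Str.len_eq] at hnE hlow
          constructor <;> omega
        | some c =>
          have hpw' : (if (g.toList == [c]) = true then
              (if n ∈ pos then (PySem.List.remove? pos n).getD pos else pos) else pos).Pairwise (· < ·) := by
            by_cases hg : (g.toList == [c]) = true
            · by_cases hm : n ∈ pos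
              · rw [if_pos hg, if_pos hm, PySem.List.remove?_eq_some_erase pos n hm, Option.getD_some]
                exact hpw.sublist List.erase_sublist
              · rw [if_pos hg, if_neg hm]; exact hpw
            · rw [if_neg hg]; exact hpw
          have hpre' : Pre_is_valid_pt2
              (if (g.toList == [c]) = true then
                (if n ∈ pos then (PySem.List.remove? pos n).getD pos else pos) else pos)
              g P (n + 1) := Or.inr ⟨hpw', Or.inl (by omega)⟩
          have hrec := ihk _ (n + 1) (by omega) hpre'
          show is_valid_pt2
              (if (g.toList == [c]) = true then
                (if n ∈ pos then (PySem.List.remove? pos n).getD pos else pos) else pos)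
              g P (n + 1) = is_valid_pt2_alt pos g P n
          rw [hrec]
          exact (pv_alt_step g P pos n c hpw hnE hget).symm
  exact fun pos n hpre => H (PySem.Str.len P + 1 - n).toNat pos n le_rfl hpre

-- ===== VERDICT (by name: the statement is the Claim_ definition above) =====
theorem is_valid_pt2_spec : Claim_equal_is_valid_pt2 := by
  intro pos glyph password n _ hpre
  unfold Spec_is_valid_pt2
  exact pv_main glyph password pos n hpre
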